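-- pv_equiv track=rewrite | github.com/Franky12111990/Python | regular_expressions.py | merge_duplicates
-- ===== SOURCE A (Python) =====
-- def merge_duplicates(contacts):
--     contacts_dict = {}
--     for contact in contacts[1:]:
--         fullname = (contact[0], contact[1])
--         if fullname not in contacts_dict:
--             contacts_dict[fullname] = contact
--         else:
--             existing_contact = contacts_dict[fullname]
--             for i in range(len(contact)):
--                 if not existing_contact[i]:
--                     existing_contact[i] = contact[i]
--     return [contacts[0]] + list(contacts_dict.values())
-- ===== SOURCE B (Python) =====
-- def merge_duplicates(contacts):
--     # Group-then-reduce: first pass groups rows by fullname; second pass fills the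
--     # first row of each group column-wise (mutating it in place, like the original).
--     groups = {}
--     for row in contacts[1:]:
--         groups.setdefault((row[0], row[1]), []).append(row)
--     merged = []
--     for rows in groups.values():
--         target = rows[0]
--         for i, field in enumerate(target):
--             if not field:
--                 target[i] = next((r[i] for r in rows[1:] if i < len(r) and r[i]), field)
--         merged.append(target)
--     return [contacts[0]] + merged
-- ===== Notes on version B (the rewrite author's own statement) =====
-- stated objective: alternative
-- what changed: A merges on the fly, mutating the stored row field-by-field at each duplicate; B first groups all rows by fullname into lists, then fills each group's first row column-wise, taking for each empty field the first later row in the group with a truthy value at that index.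
import Mathlib
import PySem

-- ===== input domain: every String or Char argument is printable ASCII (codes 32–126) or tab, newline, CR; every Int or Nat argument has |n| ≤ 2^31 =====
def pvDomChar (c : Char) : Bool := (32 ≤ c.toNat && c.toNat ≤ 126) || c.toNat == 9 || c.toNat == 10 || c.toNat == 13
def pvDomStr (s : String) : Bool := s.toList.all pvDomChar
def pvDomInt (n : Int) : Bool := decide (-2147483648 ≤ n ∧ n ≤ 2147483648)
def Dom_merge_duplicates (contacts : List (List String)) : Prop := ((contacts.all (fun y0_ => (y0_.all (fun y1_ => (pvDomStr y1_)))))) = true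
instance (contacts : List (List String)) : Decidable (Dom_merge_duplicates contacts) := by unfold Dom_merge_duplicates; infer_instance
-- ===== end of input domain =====

-- A merges duplicate contact rows on the fly; B groups rows by fullname first and then fills the
-- first row of each group column-wise (alternative decomposition, same cost). Both Pythons mutate
-- the first row of each group in place identically; the theorems here are about the return value.


-- fullname key (contact[0], contact[1]); List.getD 0/1 is exact on rows of length ≥ 2
-- (Pre_ excludes shorter rows, on which Python raises IndexError)
def pvKey (r : List String) : String × String := (r.getD 0 "", r.getD 1 "")

-- ===== PORT A =====
-- inner loop 'for i in range(len(contact)): if not existing_contact[i]: existing_contact[i] = contact[i]';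
-- List.getD/List.set are exact for the in-range indices Pre_ guarantees (Python raises IndexError otherwise)
def pvFillRow (ex c : List String) : List String :=
  (List.range c.length).foldl
    (fun e i => if e.getD i "" = "" then e.set i (c.getD i "") else e) ex

-- contacts[1:] is contacts.tail, contacts[0] is contacts.headD [] (Pre_ excludes the empty list, where
-- Python raises IndexError); the in-place mutation of the stored row is the overwriting dict insert.
def merge_duplicates (contacts : List (List String)) : List (List String) :=
  let d := contacts.tail.foldl
    (fun d c =>
      if d.contains (pvKey c) = false then d.insert (pvKey c) c
      else d.insert (pvKey c) (pvFillRow (d.getD (pvKey c) []) c))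
    PySem.Dict.empty
  contacts.headD [] :: d.values

-- ===== PORT B =====
-- next((r[i] for r in rows[1:] if i < len(r) and r[i]), field)
def pvColFill (rest : List (List String)) (i : Nat) (field : String) : String :=
  match rest.find? (fun r => decide (i < r.length) && !(r.getD i "" == "")) with
  | some r => r.getD i ""
  | none => field

-- 'for i, field in enumerate(target): if not field: target[i] = …' — each position is rewritten
-- independently from its own old value, i.e. mapIdx
def pvMergeGroup (rows : List (List String)) : List String :=
  let target := rows.headD []
  target.mapIdx (fun i f => if f = "" then pvColFill rows.tail i f else f)

-- groups.setdefault(fullname, []).append(row) is Dict.modify with default []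
def merge_duplicates_alt (contacts : List (List String)) : List (List String) :=
  let groups := contacts.tail.foldl
    (fun d r => d.modify (pvKey r) [] (fun g => g ++ [r])) PySem.Dict.empty
  contacts.headD [] :: groups.values.map pvMergeGroup

-- ===== PRECONDITION & SPEC =====
-- Pre_ is exactly where A returns: contacts nonempty (contacts[0] raises on []), every data row has
-- ≥ 2 fields (contact[0]/contact[1] raise IndexError otherwise) and is no longer than the first row
-- of its fullname-group (the fill loop reads existing_contact[i] for i < len(contact) and raises otherwise).
def Pre_merge_duplicates (contacts : List (List String)) : Prop :=
  contacts ≠ [] ∧ ∀ r ∈ contacts.tail, 2 ≤ r.length ∧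
    r.length ≤ ((contacts.tail.filter (fun x => pvKey x == pvKey r)).headD []).length
instance (contacts : List (List String)) : Decidable (Pre_merge_duplicates contacts) := by unfold Pre_merge_duplicates; infer_instance

def pvWitness_merge_duplicates : List (List String) :=
  [["name", "phone", "mail"], ["j", "doe", "", "x"], ["j", "doe", "5", ""], ["a", "b"]]

def Spec_merge_duplicates (contacts : List (List String)) (out : List (List String)) : Prop := out = merge_duplicates_alt contacts
instance (contacts : List (List String)) (out : List (List String)) : Decidable (Spec_merge_duplicates contacts out) := by unfold Spec_merge_duplicates; infer_instance

-- ===== CLAIM (what is proved, stated in full; the proofs are below) =====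
def Claim_equal_merge_duplicates : Prop := ∀ (contacts : List (List String)), Dom_merge_duplicates contacts → Pre_merge_duplicates contacts → Spec_merge_duplicates contacts (merge_duplicates contacts)

-- ===== LEMMAS AND PROOFS =====

theorem getD_set_eq (l : List String) (i j : Nat) (v : String) :
    (l.set i v).getD j "" = if i = j ∧ i < l.length then v else l.getD j "" := by
  simp only [List.getD_eq_getElem?_getD, List.getElem?_set]
  by_cases h : i = j
  · subst h
    by_cases h2 : i < l.length <;> simp [h2]
  · simp [h]

theorem foldl_set_length (l : List Nat) (c ex : List String) :
    (l.foldl (fun e i => if e.getD i "" = "" then e.set i (c.getD i "") else e) ex).length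
      = ex.length := by
  induction l generalizing ex with
  | nil => rfl
  | cons a t ih =>
    simp only [List.foldl_cons]
    rw [ih]
    split <;> simp

theorem pvFillRowAux_getD (c ex : List String) (n : Nat) (hn : n ≤ ex.length) (j : Nat) :
    ((List.range n).foldl (fun e i => if e.getD i "" = "" then e.set i (c.getD i "") else e) ex).getD j ""
      = if ex.getD j "" = "" ∧ j < n then c.getD j "" else ex.getD j "" := by
  induction n generalizing j with
  | zero => simp
  | succ m ih =>
    have hm := ih (Nat.le_of_succ_le hn) j
    have hFm := ih (Nat.le_of_succ_le hn) m
    rw [if_neg (by omega : ¬ (ex.getD m "" = "" ∧ m < m)) ] at hFm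
    rw [List.range_succ, List.foldl_append, List.foldl_cons, List.foldl_nil]
    have hlen : ((List.range m).foldl (fun e i => if e.getD i "" = "" then e.set i (c.getD i "") else e) ex).length = ex.length :=
      foldl_set_length _ _ _
    by_cases hx : ex.getD m "" = ""
    · rw [if_pos (by rw [hFm]; exact hx), getD_set_eq, hlen, hm]
      by_cases hj : m = j
      · subst hj
        rw [if_pos ⟨rfl, by omega⟩, if_pos ⟨hx, by omega⟩]
      · rw [if_neg (by tauto)]
        split_ifs with h1 h2 h2
        · rfl
        · exact absurd ⟨h1.1, by omega⟩ h2
        · have hjm : ¬ j < m := fun hlt => h1 ⟨h2.1, hlt⟩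
          exact absurd (by omega : m = j) hj
        · rfl
    · rw [if_neg (by rw [hFm]; exact hx), hm]
      split_ifs with h1 h2 h2
      · rfl
      · exact absurd ⟨h1.1, by omega⟩ h2
      · have hjm : ¬ j < m := fun hlt => h1 ⟨h2.1, hlt⟩
        exact absurd ((by omega : j = m) ▸ h2.1) hx
      · rfl

theorem pvFillRow_length (ex c : List String) : (pvFillRow ex c).length = ex.length :=
  foldl_set_length _ _ _

theorem pvFillRow_getD (ex c : List String) (hc : c.length ≤ ex.length) (j : Nat) :
    (pvFillRow ex c).getD j ""
      = if ex.getD j "" = "" ∧ j < c.length then c.getD j "" else ex.getD j "" :=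
  pvFillRowAux_getD c ex c.length hc j

theorem foldl_fill_length (h : List String) (rest : List (List String)) :
    (rest.foldl pvFillRow h).length = h.length := by
  induction rest generalizing h with
  | nil => rfl
  | cons c rs ih => simp only [List.foldl_cons]; rw [ih, pvFillRow_length]

theorem foldl_fill_getD (h : List String) (rest : List (List String))
    (hlen : ∀ r ∈ rest, r.length ≤ h.length) (j : Nat) :
    (rest.foldl pvFillRow h).getD j ""
      = if h.getD j "" = "" then pvColFill rest j (h.getD j "") else h.getD j "" := by
  induction rest generalizing h with
  | nil => simp [pvColFill]
  | cons c rs ih =>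
    have hch : c.length ≤ h.length := hlen c (List.mem_cons_self ..)
    have hrs : ∀ r ∈ rs, r.length ≤ (pvFillRow h c).length := by
      rw [pvFillRow_length]; exact fun r hr => hlen r (List.mem_cons_of_mem _ hr)
    rw [List.foldl_cons, ih _ hrs]
    have hc := pvFillRow_getD h c hch j
    by_cases hH : h.getD j "" = ""
    · rw [hH] at hc
      rw [if_pos hH, hH]
      by_cases hq : (decide (j < c.length) && !(c.getD j "" == "")) = true
      · have hjc : j < c.length := by simpa using (Bool.and_elim_left hq)
        have hcg : ¬ c.getD j "" = "" := by
          have := Bool.and_elim_right hq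
          simpa using this
        rw [if_pos (by exact ⟨rfl, hjc⟩)] at hc
        rw [hc, if_neg hcg]
        have hfind : List.find? (fun r => decide (j < r.length) && !(r.getD j "" == "")) (c :: rs)
            = some c := List.find?_cons_of_pos (by simpa using hq)
        simp only [pvColFill, hfind]
      · have hX : (pvFillRow h c).getD j "" = "" := by
          rw [hc]
          split_ifs with h1
          · rcases h1 with ⟨-, hjc⟩
            by_cases hg : c.getD j "" = ""
            · exact hg
            · exfalso
              apply hq
              rw [List.getD_eq_getElem c "" hjc] at hg
              simp only [hjc, decide_true, Bool.true_and, Bool.not_eq_eq_eq_not,  List.getD_eq_getElem?_getD, List.getElem?_eq_getElem hjc]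
              simpa using hg
          · rfl
        rw [hX, if_pos rfl]
        have hfind : List.find? (fun r => decide (j < r.length) && !(r.getD j "" == "")) (c :: rs)
            = List.find? (fun r => decide (j < r.length) && !(r.getD j "" == "")) rs :=
          List.find?_cons_of_neg (by simpa using eq_false_of_ne_true hq)
        simp only [pvColFill, hfind]
    · rw [if_neg (fun hand => hH hand.1)] at hc
      rw [hc, if_neg hH, if_neg hH]

theorem mergeGroup_eq (h : List String) (rest : List (List String))
    (hlen : ∀ r ∈ rest, r.length ≤ h.length) :
    rest.foldl pvFillRow h = pvMergeGroup (h :: rest) := by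
  apply List.ext_getElem
  · simp [pvMergeGroup, foldl_fill_length]
  · intro i h1 h2
    have hih : i < h.length := by simpa [foldl_fill_length] using h1
    rw [← List.getD_eq_getElem _ "" h1]
    rw [foldl_fill_getD h rest hlen i]
    simp only [pvMergeGroup, List.headD_cons, List.tail_cons, List.getElem_mapIdx]
    rw [List.getD_eq_getElem _ "" hih]

theorem dictB_getD (l : List (List String)) (k : String × String) :
    (l.foldl (fun d r => d.modify (pvKey r) [] (fun g => g ++ [r])) PySem.Dict.empty).getD k []
      = l.filter (fun r => pvKey r == k) := by
  have hmap : (l.map (fun r => (pvKey r, r))).foldl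
      (fun (d : PySem.Dict (String × String) (List (List String))) p => d.modify p.1 [] (fun g => g ++ [p.2]))
      PySem.Dict.empty
      = l.foldl (fun d r => d.modify (pvKey r) [] (fun g => g ++ [r])) PySem.Dict.empty := by
    rw [List.foldl_map]
  rw [← hmap, PySem.Dict.getD_foldl_modify_append]
  simp [List.filter_map, Function.comp_def]

def stepA (d : PySem.Dict (String × String) (List String)) (c : List String) :
    PySem.Dict (String × String) (List String) :=
  if d.contains (pvKey c) = false then d.insert (pvKey c) c
  else d.insert (pvKey c) (pvFillRow (d.getD (pvKey c) []) c)

theorem dictA_get? (l : List (List String)) (k : String × String) :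
    (l.foldl stepA PySem.Dict.empty).get? k
      = match l.filter (fun r => pvKey r == k) with
        | [] => none
        | h :: t => some (t.foldl pvFillRow h) := by
  induction l using List.reverseRecOn with
  | nil => simp [PySem.Dict.get?_empty]
  | append_singleton l c ih =>
    rw [List.foldl_append, List.foldl_cons, List.foldl_nil, List.filter_append]
    by_cases hk : pvKey c = k
    · subst hk
      simp only [List.filter_cons, List.filter_nil, BEq.rfl, if_true]
      rcases hf : l.filter (fun r => pvKey r == pvKey c) with _ | ⟨h, t⟩
      · rw [hf] at ih
        have hcont : (l.foldl stepA PySem.Dict.empty).contains (pvKey c) = false := by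
          rw [PySem.Dict.contains_eq_isSome_get?, ih]
          rfl
        rw [stepA, if_pos hcont, PySem.Dict.get?_insert_self]
        simp
      · rw [hf] at ih
        have hcont : (l.foldl stepA PySem.Dict.empty).contains (pvKey c) = true := by
          rw [PySem.Dict.contains_eq_isSome_get?, ih]
          rfl
        rw [stepA, if_neg (by simp [hcont]), PySem.Dict.get?_insert_self,
          PySem.Dict.getD_eq_get?_getD, ih]
        simp [List.foldl_append]
    · have hbeq : (pvKey c == k) = false := by simpa using hk
      have hget : ∀ (d : PySem.Dict (String × String) (List String)) v,
          (d.insert (pvKey c) v).get? k = d.get? k :=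
        fun d v => PySem.Dict.get?_insert_of_ne d v (fun he => hk he.symm)
      simp only [List.filter_cons, List.filter_nil, hbeq, Bool.false_eq_true, if_false,
        List.append_nil]
      rw [stepA]
      split
      · rw [hget]; exact ih
      · rw [hget]; exact ih

theorem stepA_insert : stepA = fun d c => d.insert (pvKey c)
    (if d.contains (pvKey c) = false then c else pvFillRow (d.getD (pvKey c) []) c) := by
  funext d c
  rw [stepA]
  split <;> rfl

theorem keysA_eq (l : List (List String)) :
    (l.foldl stepA PySem.Dict.empty).keys = PySem.Set.update [] (l.map pvKey) := by
  rw [stepA_insert]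
  rw [PySem.Dict.keys_foldl_insert_key]
  simp

theorem keysB_eq (l : List (List String)) :
    (l.foldl (fun d r => d.modify (pvKey r) [] (fun g => g ++ [r])) PySem.Dict.empty).keys
      = PySem.Set.update [] (l.map pvKey) := by
  rw [PySem.Dict.keys_foldl_modify_key]
  simp

theorem nodupA (l : List (List String)) :
    (l.foldl stepA PySem.Dict.empty).keys.Nodup := by
  rw [stepA_insert]
  exact PySem.Dict.nodup_keys_foldl_insert_key _ _ _ _ (by simp)

theorem nodupB (l : List (List String)) :
    (l.foldl (fun d r => d.modify (pvKey r) [] (fun g => g ++ [r])) PySem.Dict.empty).keys.Nodup := by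
  exact PySem.Dict.nodup_keys_foldl_modify_key _ _ _ _ _ (by simp)

theorem merge_eq_of_rows (contacts : List (List String))
    (hrows : ∀ r ∈ contacts.tail, 2 ≤ r.length ∧
      r.length ≤ ((contacts.tail.filter (fun x => pvKey x == pvKey r)).headD []).length) :
    merge_duplicates contacts = merge_duplicates_alt contacts := by
  simp only [merge_duplicates, merge_duplicates_alt]
  have hstep : (fun (d : PySem.Dict (String × String) (List String)) c =>
      if d.contains (pvKey c) = false then d.insert (pvKey c) c
      else d.insert (pvKey c) (pvFillRow (d.getD (pvKey c) []) c)) = stepA := rfl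
  rw [hstep]
  congr 1
  set dA := contacts.tail.foldl stepA PySem.Dict.empty with hdA
  set dB := contacts.tail.foldl (fun d r => d.modify (pvKey r) [] (fun g => g ++ [r]))
    PySem.Dict.empty with hdB
  have hkeys : dA.keys = dB.keys := by rw [hdA, hdB, keysA_eq, keysB_eq]
  rw [PySem.Dict.values_eq_map_keys dA (nodupA _) [],
    PySem.Dict.values_eq_map_keys dB (nodupB _) [], List.map_map, ← hkeys]
  apply List.map_congr_left
  intro k hk
  have hget := dictA_get? contacts.tail k
  have hgetD := dictB_getD contacts.tail k
  rcases hf : contacts.tail.filter (fun r => pvKey r == k) with _ | ⟨h, t⟩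
  · exfalso
    rw [hf] at hget
    exact (PySem.Dict.get?_eq_none_iff_not_mem_keys dA k).mp hget hk
  · rw [hf] at hget hgetD
    have hlen_t : ∀ r ∈ t, r.length ≤ h.length := by
      intro r hr
      have hmem : r ∈ contacts.tail.filter (fun x => pvKey x == k) := by
        rw [hf]; exact List.mem_cons_of_mem _ hr
      have hmt := List.mem_of_mem_filter hmem
      have hpred : pvKey r = k := by simpa using List.of_mem_filter hmem
      have hle := (hrows r hmt).2
      rw [hpred, hf] at hle
      simpa using hle
    simp only [Function.comp]
    rw [PySem.Dict.getD_eq_get?_getD, hget, hgetD]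
    simp only [Option.getD_some]
    exact mergeGroup_eq h t hlen_t

-- ===== VERDICT (by name: the statement is the Claim_ definition above) =====
theorem merge_duplicates_spec : Claim_equal_merge_duplicates := by
  intro contacts _ hpre
  unfold Spec_merge_duplicates
  exact merge_eq_of_rows contacts hpre.2
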